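-- pv_equiv track=rewrite | github.com/Chou-po-chen/openai_ner | model.py | middle_split
-- ===== SOURCE A (Python) =====
-- def middle_split(input_str):
--    # 找到所有換行符號的位置
--     newline_indices = [i for i, char in enumerate(input_str) if char == '\n']
--
--     if newline_indices:
--         # 如果存在換行符號
--         middle_index = len(input_str) // 2
--         closest_newline = min(newline_indices, key=lambda x: abs(x - middle_index))
--
--         first_half = input_str[:closest_newline + 1]
--         second_half = input_str[closest_newline + 1:]
--     else:
--         # 如果沒有換行符號，直接在字串的中間進行切割
--         middle_index = len(input_str) // 2
--         first_half = input_str[:middle_index]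
--         second_half = input_str[middle_index:]
--
--     return first_half, second_half
-- ===== SOURCE B (Python) =====
-- def middle_split(input_str):
--     # Outward search from the midpoint: probe mid-d then mid+d for growing d,
--     # and split right after the first newline found; no newline -> split at mid.
--     n = len(input_str)
--     mid = n // 2
--     idx = None
--     for d in range(n):
--         left = mid - d
--         if left >= 0 and input_str[left] == '\n':
--             idx = left
--             break
--         right = mid + d
--         if d > 0 and right < n and input_str[right] == '\n':
--             idx = right
--             break
--     if idx is None:
--         return input_str[:mid], input_str[mid:]
--     return input_str[:idx + 1], input_str[idx + 1:]
-- ===== Notes on version B (the rewrite author's own statement) =====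
-- stated objective: alternative
-- what changed: Instead of collecting every newline position and taking min by distance to the midpoint, B searches outward from the midpoint (probing mid-d then mid+d for growing d) and splits at the first newline found, falling back to the midpoint split when there is none.
import Mathlib
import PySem

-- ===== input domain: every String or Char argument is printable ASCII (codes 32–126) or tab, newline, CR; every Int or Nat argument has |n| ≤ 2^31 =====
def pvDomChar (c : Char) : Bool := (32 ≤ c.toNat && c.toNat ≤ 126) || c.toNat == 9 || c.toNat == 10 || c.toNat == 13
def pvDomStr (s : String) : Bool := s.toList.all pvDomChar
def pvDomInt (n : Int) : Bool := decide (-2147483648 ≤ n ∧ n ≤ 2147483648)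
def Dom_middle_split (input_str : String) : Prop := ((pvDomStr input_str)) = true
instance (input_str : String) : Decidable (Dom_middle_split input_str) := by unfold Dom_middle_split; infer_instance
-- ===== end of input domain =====

-- B replaces "collect all newline positions, then min by distance to the midpoint" with an
-- outward search from the midpoint (probe mid-d, then mid+d, for growing d); alternative algorithm.

-- ===== PORT A =====
-- A-side helper: the list [i for i, char in enumerate(input_str) if char == '\n']
def nlIdx (cs : List Char) : List Int :=
  ((PySem.List.enumerate cs 0).filter (fun p => p.2 == '\n')).map (fun p => p.1)

def middle_split (input_str : String) : String × String :=
  let cs := input_str.toList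
  let middle_index : Int := PySem.Int.floordiv (cs.length : Int) 2
  match PySem.List.min? (nlIdx cs) (fun x => |x - middle_index|) with
  | some closest_newline =>
      (PySem.Str.slice input_str none (some (closest_newline + 1)),
       PySem.Str.slice input_str (some (closest_newline + 1)) none)
  | none =>
      (PySem.Str.slice input_str none (some middle_index),
       PySem.Str.slice input_str (some middle_index) none)

-- ===== PORT B =====
-- B-side helper: the for-d-in-range(n) loop of Source B; fuel = remaining iterations.
def msProbe (cs : List Char) (mid : Nat) : Nat → Nat → Option Nat
  | _, 0 => none
  | d, fuel + 1 =>
    if d ≤ mid ∧ cs[mid - d]? = some '\n' then some (mid - d)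
    else if 0 < d ∧ mid + d < cs.length ∧ cs[mid + d]? = some '\n' then some (mid + d)
    else msProbe cs mid (d + 1) fuel

def middle_split_alt (input_str : String) : String × String :=
  let cs := input_str.toList
  let mid : Nat := cs.length / 2
  match msProbe cs mid 0 cs.length with
  | some idx =>
      (PySem.Str.slice input_str none (some ((idx : Int) + 1)),
       PySem.Str.slice input_str (some ((idx : Int) + 1)) none)
  | none =>
      (PySem.Str.slice input_str none (some (mid : Int)),
       PySem.Str.slice input_str (some (mid : Int)) none)

-- ===== PRECONDITION & SPEC =====
def Spec_middle_split (input_str : String) (out : String × String) : Prop := out = middle_split_alt input_str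
instance (input_str : String) (out : String × String) : Decidable (Spec_middle_split input_str out) := by unfold Spec_middle_split; infer_instance

-- ===== CLAIM (what is proved, stated in full; the proofs are below) =====
def Claim_equal_middle_split : Prop := ∀ (input_str : String), Dom_middle_split input_str → Spec_middle_split input_str (middle_split input_str)

-- ===== LEMMAS AND PROOFS =====

lemma fdiv_two (n : Nat) : PySem.Int.floordiv (n : Int) 2 = ((n / 2 : Nat) : Int) := by
  simp [PySem.Int.floordiv, Int.fdiv_eq_ediv]

lemma mem_nlIdx {cs : List Char} {y : Int} :
    y ∈ nlIdx cs ↔ ∃ (k : Nat) (h : k < cs.length), y = (k : Int) ∧ cs[k] = '\n' := by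
  unfold nlIdx
  constructor
  · rintro hy
    rcases List.mem_map.mp hy with ⟨p, hpf, rfl⟩
    rcases List.mem_filter.mp hpf with ⟨hpe, hnl⟩
    rcases (PySem.List.mem_enumerate_iff cs 0 p).mp hpe with ⟨k, hk, rfl⟩
    exact ⟨k, hk, by simp, by simpa using hnl⟩
  · rintro ⟨k, hk, rfl, hnl⟩
    refine List.mem_map.mpr ⟨((k : Int), cs[k]), List.mem_filter.mpr ⟨?_, by simp [hnl]⟩, rfl⟩
    exact (PySem.List.mem_enumerate_iff cs 0 _).mpr ⟨k, hk, by simp⟩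

lemma nlIdx_pairwise (cs : List Char) : (nlIdx cs).Pairwise (· < ·) := by
  unfold nlIdx
  exact (((PySem.List.pairwise_lt_enumerate cs 0).filter _).map _ (fun a b h => h))

-- PySem.List.min? keeps the FIRST element achieving the minimal key; on a strictly
-- increasing list that is the least such element.
lemma min?_first (key : Int → Int) :
    ∀ (xs : List Int) (a m : Int),
      m ∈ a :: xs →
      (∀ y ∈ a :: xs, key m ≤ key y) →
      (∀ y ∈ a :: xs, key y = key m → m ≤ y) →
      (a :: xs).Pairwise (· < ·) →
      PySem.List.min? (a :: xs) key = some m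
  | [], a, m, hmem, _, _, _ => by
      rcases List.mem_cons.mp hmem with rfl | h
      · rfl
      · cases h
  | x :: xs, a, m, hmem, hmin, hfirst, hp => by
      rcases List.pairwise_cons.mp hp with ⟨haxt, hp'⟩
      rcases List.pairwise_cons.mp hp' with ⟨hxt, hp''⟩
      have hax : a < x := haxt x (by simp)
      by_cases hc : key x < key a
      · have hstep : PySem.List.min? (a :: x :: xs) key = PySem.List.min? (x :: xs) key := by
          simp [PySem.List.min?, hc]
        rw [hstep]
        apply min?_first key xs x m
        · rcases List.mem_cons.mp hmem with rfl | h
          · exfalso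
            have := hmin x (by simp)
            omega
          · exact h
        · exact fun y hy => hmin y (List.mem_cons_of_mem a hy)
        · exact fun y hy => hfirst y (List.mem_cons_of_mem a hy)
        · exact hp'
      · have hstep : PySem.List.min? (a :: x :: xs) key = PySem.List.min? (a :: xs) key := by
          simp [PySem.List.min?, hc]
        rw [hstep]
        apply min?_first key xs a m
        · rcases List.mem_cons.mp hmem with rfl | h
          · exact List.mem_cons_self
          · rcases List.mem_cons.mp h with rfl | h'
            · exfalso
              have h1 := hmin a (by simp)
              have h2 : key m = key a := le_antisymm h1 (by omega)
              have h3 := hfirst a (by simp) h2.symm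
              omega
            · exact List.mem_cons_of_mem a h'
        · rintro y hy
          rcases List.mem_cons.mp hy with rfl | h'
          · exact hmin y (by simp)
          · exact hmin y (by simp [h'])
        · rintro y hy
          rcases List.mem_cons.mp hy with rfl | h'
          · exact hfirst y (by simp)
          · exact hfirst y (by simp [h'])
        · exact List.pairwise_cons.mpr ⟨fun y hy => haxt y (List.mem_cons_of_mem x hy), hp''⟩

lemma min?_eq_first {xs : List Int} (key : Int → Int) (m : Int) (hmem : m ∈ xs)
    (hmin : ∀ y ∈ xs, key m ≤ key y) (hfirst : ∀ y ∈ xs, key y = key m → m ≤ y)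
    (hp : xs.Pairwise (· < ·)) : PySem.List.min? xs key = some m := by
  cases xs with
  | nil => cases hmem
  | cons x t => exact min?_first key t x m hmem hmin hfirst hp

lemma probe_min (cs : List Char) :
    ∀ (fuel d : Nat), d + fuel = cs.length →
      (∀ (k : Nat) (h : k < cs.length), cs[k] = '\n' →
        (d : Int) ≤ |(k : Int) - ((cs.length / 2 : Nat) : Int)|) →
      PySem.List.min? (nlIdx cs) (fun x => |x - ((cs.length / 2 : Nat) : Int)|)
        = (msProbe cs (cs.length / 2) d fuel).map (fun i => (i : Int))
  | 0, d, hdf, hfar => by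
      have hnil : nlIdx cs = [] := by
        rw [List.eq_nil_iff_forall_not_mem]
        intro y hy
        rcases mem_nlIdx.mp hy with ⟨k, hk, rfl, hnl⟩
        have h1 := hfar k hk hnl
        have hmid : cs.length / 2 ≤ cs.length := Nat.div_le_self _ _
        rcases abs_cases ((k : Int) - ((cs.length / 2 : Nat) : Int)) with ⟨he, _⟩ | ⟨he, _⟩ <;> omega
      rw [hnil, msProbe]
      rfl
  | fuel + 1, d, hdf, hfar => by
      have hn1 : 1 ≤ cs.length := by omega
      have hmidlt : cs.length / 2 < cs.length := Nat.div_lt_self (by omega) (by omega)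
      rw [msProbe]
      by_cases h1 : d ≤ (cs.length / 2) ∧ cs[(cs.length / 2) - d]? = some '\n'
      · rw [if_pos h1]
        rcases h1 with ⟨hdm, hget⟩
        have hlt : (cs.length / 2) - d < cs.length := by omega
        have hnl : cs[(cs.length / 2) - d] = '\n' := by
          rcases List.getElem?_eq_some_iff.mp hget with ⟨h, he⟩; exact he
        have hres : PySem.List.min? (nlIdx cs) (fun x => |x - ((cs.length / 2 : Nat) : Int)|)
            = some (((cs.length / 2) - d : Nat) : Int) := by
          apply min?_eq_first
          · exact mem_nlIdx.mpr ⟨(cs.length / 2) - d, hlt, rfl, hnl⟩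
          · intro y hy
            rcases mem_nlIdx.mp hy with ⟨k, hk, rfl, hknl⟩
            have h2 := hfar k hk hknl
            rcases abs_cases ((((cs.length / 2) - d : Nat) : Int) - ((cs.length / 2 : Nat) : Int)) with ⟨he, _⟩ | ⟨he, _⟩ <;>
              rcases abs_cases ((k : Int) - ((cs.length / 2 : Nat) : Int)) with ⟨he2, _⟩ | ⟨he2, _⟩ <;> omega
          · intro y hy hkey
            rcases mem_nlIdx.mp hy with ⟨k, hk, rfl, hknl⟩
            have h2 := hfar k hk hknl
            rcases abs_cases ((((cs.length / 2) - d : Nat) : Int) - ((cs.length / 2 : Nat) : Int)) with ⟨he, _⟩ | ⟨he, _⟩ <;>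
              rcases abs_cases ((k : Int) - ((cs.length / 2 : Nat) : Int)) with ⟨he2, _⟩ | ⟨he2, _⟩ <;> omega
          · exact nlIdx_pairwise cs
        rw [hres]
        rfl
      · rw [if_neg h1]
        by_cases h2 : 0 < d ∧ (cs.length / 2) + d < cs.length ∧ cs[(cs.length / 2) + d]? = some '\n'
        · rw [if_pos h2]
          rcases h2 with ⟨hd0, hlt, hget⟩
          have hnl : cs[(cs.length / 2) + d] = '\n' := by
            rcases List.getElem?_eq_some_iff.mp hget with ⟨h, he⟩; exact he
          have hres : PySem.List.min? (nlIdx cs) (fun x => |x - ((cs.length / 2 : Nat) : Int)|)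
              = some (((cs.length / 2) + d : Nat) : Int) := by
            apply min?_eq_first
            · exact mem_nlIdx.mpr ⟨(cs.length / 2) + d, hlt, rfl, hnl⟩
            · intro y hy
              rcases mem_nlIdx.mp hy with ⟨k, hk, rfl, hknl⟩
              have h3 := hfar k hk hknl
              rcases abs_cases ((((cs.length / 2) + d : Nat) : Int) - ((cs.length / 2 : Nat) : Int)) with ⟨he, _⟩ | ⟨he, _⟩ <;>
                rcases abs_cases ((k : Int) - ((cs.length / 2 : Nat) : Int)) with ⟨he2, _⟩ | ⟨he2, _⟩ <;> omega
            · intro y hy hkey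
              rcases mem_nlIdx.mp hy with ⟨k, hk, rfl, hknl⟩
              have h3 := hfar k hk hknl
              by_contra hcon
              have hkd : (k : Int) = ((cs.length / 2 : Nat) : Int) - (d : Int) := by
                rcases abs_cases ((((cs.length / 2) + d : Nat) : Int) - ((cs.length / 2 : Nat) : Int)) with ⟨he, _⟩ | ⟨he, _⟩ <;>
                  rcases abs_cases ((k : Int) - ((cs.length / 2 : Nat) : Int)) with ⟨he2, _⟩ | ⟨he2, _⟩ <;> omega
              have hdm : d ≤ cs.length / 2 := by omega
              have hkeq : k = (cs.length / 2) - d := by omega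
              subst hkeq
              exact h1 ⟨hdm, List.getElem?_eq_some_iff.mpr ⟨by omega, hknl⟩⟩
            · exact nlIdx_pairwise cs
          rw [hres]
          rfl
        · rw [if_neg h2]
          apply probe_min cs fuel (d + 1) (by omega)
          intro k hk hknl
          have h3 := hfar k hk hknl
          by_contra hcon
          have hkd : |(k : Int) - ((cs.length / 2 : Nat) : Int)| = (d : Int) := by omega
          rcases abs_cases ((k : Int) - ((cs.length / 2 : Nat) : Int)) with ⟨he, _⟩ | ⟨he, _⟩
          · -- k = mid + d
            rcases (by omega : 0 < d ∨ d = 0) with hd0 | rfl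
            · have hkeq : k = (cs.length / 2) + d := by omega
              subst hkeq
              exact h2 ⟨hd0, by omega, List.getElem?_eq_some_iff.mpr ⟨by omega, hknl⟩⟩
            · have hkeq : k = (cs.length / 2) - 0 := by omega
              subst hkeq
              exact h1 ⟨by omega, List.getElem?_eq_some_iff.mpr ⟨by omega, hknl⟩⟩
          · -- k = mid - d
            have hdm : d ≤ cs.length / 2 := by omega
            have hkeq : k = (cs.length / 2) - d := by omega
            subst hkeq
            exact h1 ⟨hdm, List.getElem?_eq_some_iff.mpr ⟨by omega, hknl⟩⟩

-- ===== VERDICT (by name: the statement is the Claim_ definition above) =====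
theorem middle_split_spec : Claim_equal_middle_split := by
  intro s _
  unfold Spec_middle_split middle_split middle_split_alt
  have hmain := probe_min s.toList s.toList.length 0 (by omega)
    (fun k hk _ => abs_nonneg _)
  simp only [fdiv_two]
  rw [hmain]
  cases msProbe s.toList (s.toList.length / 2) 0 s.toList.length <;> simp
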